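-- pv_equiv track=rewrite | github.com/drodda/advent_of_code | aoc_2024/day_15.py | parse_world
-- ===== SOURCE A (Python) =====
-- def parse_world(data):
--     start = None
--     walls = set()
--     boxes = set()
--     for y, row in enumerate(data):
--         for x, c in enumerate(row):
--             pos = (x, y)
--             if c == "#":
--                 walls.add(pos)
--             elif c == "O":
--                 boxes.add(pos)
--             elif c == "@":
--                 start = pos
--     return start, walls, boxes
-- ===== SOURCE B (Python) =====
-- def parse_world(data):
--     walls = {(x, y) for y, row in enumerate(data) for x, c in enumerate(row) if c == "#"}
--     boxes = {(x, y) for y, row in enumerate(data) for x, c in enumerate(row) if c == "O"}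
--     starts = [(x, y) for y, row in enumerate(data) for x, c in enumerate(row) if c == "@"]
--     start = starts[-1] if starts else None
--     return start, walls, boxes
-- ===== Notes on version B (the rewrite author's own statement) =====
-- stated objective: idiomatic
-- what changed: Replaces the single stateful nested loop with three independent declarative scans (two set comprehensions for walls/boxes and a list comprehension whose last element gives the start), eliminating the mutated accumulators.
import Mathlib
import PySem

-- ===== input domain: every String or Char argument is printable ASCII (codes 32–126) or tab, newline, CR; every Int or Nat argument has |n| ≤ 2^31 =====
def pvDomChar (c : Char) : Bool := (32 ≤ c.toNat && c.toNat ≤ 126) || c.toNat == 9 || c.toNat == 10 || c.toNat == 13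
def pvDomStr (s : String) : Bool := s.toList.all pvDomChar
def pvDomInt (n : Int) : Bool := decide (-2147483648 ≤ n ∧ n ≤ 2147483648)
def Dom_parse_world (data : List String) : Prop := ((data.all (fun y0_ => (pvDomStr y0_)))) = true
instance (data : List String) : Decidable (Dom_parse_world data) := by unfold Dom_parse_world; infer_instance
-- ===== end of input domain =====

-- B replaces A's single stateful nested loop by three independent declarative scans
-- (filtered position lists for '#', 'O', '@'; start = last '@' position) — idiomatic rewrite, same cost.


-- ===== PORT A =====
-- inner loop body: one cell (x, c) of row y, updating (start, walls, boxes)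
def pvStepCell (y : Int)
    (s : (Option (Int × Int)) × (PySem.Set (Int × Int)) × (PySem.Set (Int × Int)))
    (xc : Int × Char) :
    (Option (Int × Int)) × (PySem.Set (Int × Int)) × (PySem.Set (Int × Int)) :=
  let pos : Int × Int := (xc.1, y)
  if xc.2 == '#' then (s.1, PySem.Set.add s.2.1 pos, s.2.2)
  else if xc.2 == 'O' then (s.1, s.2.1, PySem.Set.add s.2.2 pos)
  else if xc.2 == '@' then (some pos, s.2.1, s.2.2)
  else s

-- outer loop body: one row (y, row)
def pvStepRow
    (s : (Option (Int × Int)) × (PySem.Set (Int × Int)) × (PySem.Set (Int × Int)))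
    (yr : Int × String) :
    (Option (Int × Int)) × (PySem.Set (Int × Int)) × (PySem.Set (Int × Int)) :=
  (PySem.List.enumerate yr.2.toList 0).foldl (pvStepCell yr.1) s

def parse_world (data : List String) : (Option (Int × Int)) × (List (Int × Int)) × (List (Int × Int)) :=
  (PySem.List.enumerate data 0).foldl pvStepRow (none, PySem.Set.empty, PySem.Set.empty)

-- ===== PORT B =====
-- positions of character ch in the grid, row-major
def pvFindAll (data : List String) (ch : Char) : List (Int × Int) :=
  (PySem.List.enumerate data 0).flatMap (fun yr =>
    ((PySem.List.enumerate yr.2.toList 0).filter (fun xc => xc.2 == ch)).map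
      (fun xc => (xc.1, yr.1)))

def parse_world_alt (data : List String) : (Option (Int × Int)) × (List (Int × Int)) × (List (Int × Int)) :=
  let walls := PySem.Set.ofList (pvFindAll data '#')
  let boxes := PySem.Set.ofList (pvFindAll data 'O')
  let starts := pvFindAll data '@'
  (starts.getLast?, walls, boxes)

-- ===== PRECONDITION & SPEC =====
def Spec_parse_world (data : List String) (out : (Option (Int × Int)) × (List (Int × Int)) × (List (Int × Int))) : Prop := out = parse_world_alt data
instance (data : List String) (out : (Option (Int × Int)) × (List (Int × Int)) × (List (Int × Int))) : Decidable (Spec_parse_world data out) := by unfold Spec_parse_world; infer_instance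

-- ===== CLAIM (what is proved, stated in full; the proofs are below) =====
def Claim_equal_parse_world : Prop := ∀ (data : List String), Dom_parse_world data → Spec_parse_world data (parse_world data)

-- ===== LEMMAS AND PROOFS =====

-- generalized pvFindAll with arbitrary starting row index
def pvP (data : List String) (y : Int) (ch : Char) : List (Int × Int) :=
  (PySem.List.enumerate data y).flatMap (fun yr =>
    ((PySem.List.enumerate yr.2.toList 0).filter (fun xc => xc.2 == ch)).map
      (fun xc => (xc.1, yr.1)))

-- row-level positions of ch, starting at column x
def pvRowP (row : List Char) (x y : Int) (ch : Char) : List (Int × Int) :=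
  ((PySem.List.enumerate row x).filter (fun xc => xc.2 == ch)).map (fun xc => (xc.1, y))

lemma getLast?_cons_or {α : Type} (a : α) (l : List α) :
    (a :: l).getLast? = l.getLast?.or (some a) := by
  cases l with
  | nil => rfl
  | cons b t =>
    rw [List.getLast?_cons_cons]
    cases h : (b :: t).getLast? with
    | none => simp at h
    | some v => rfl

lemma getLast?_append_or {α : Type} (a b : List α) :
    (a ++ b).getLast? = b.getLast?.or a.getLast? := by
  induction a with
  | nil => simp
  | cons x t ih =>
    rw [List.cons_append, getLast?_cons_or, getLast?_cons_or, ih, Option.or_assoc]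

lemma row_fold (y : Int) (row : List Char) : ∀ (x : Int)
    (s : (Option (Int × Int)) × (PySem.Set (Int × Int)) × (PySem.Set (Int × Int))),
    (PySem.List.enumerate row x).foldl (pvStepCell y) s =
      ((pvRowP row x y '@').getLast?.or s.1,
       PySem.Set.update s.2.1 (pvRowP row x y '#'),
       PySem.Set.update s.2.2 (pvRowP row x y 'O')) := by
  induction row with
  | nil => intro x s; simp [PySem.List.enumerate_nil, pvRowP, PySem.Set.update]
  | cons c rest ih =>
    intro x s
    rw [PySem.List.enumerate_cons, List.foldl_cons, ih]
    have hP : ∀ ch, pvRowP (c :: rest) x y ch =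
        (if c == ch then [((x : Int), y)] else []) ++ pvRowP rest (x + 1) y ch := by
      intro ch
      simp only [pvRowP, PySem.List.enumerate_cons, List.filter_cons]
      by_cases h : c == ch <;> simp [h]
    rw [hP '#', hP 'O', hP '@']
    simp only [pvStepCell]
    by_cases h1 : c = '#'
    · subst h1; simp [PySem.Set.update]
    · by_cases h2 : c = 'O'
      · subst h2; simp [PySem.Set.update]
      · by_cases h3 : c = '@'
        · subst h3; simp [PySem.Set.update, getLast?_cons_or]
        · simp [h1, h2, h3]

lemma grid_fold (data : List String) : ∀ (y : Int)
    (s : (Option (Int × Int)) × (PySem.Set (Int × Int)) × (PySem.Set (Int × Int))),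
    (PySem.List.enumerate data y).foldl pvStepRow s =
      ((pvP data y '@').getLast?.or s.1,
       PySem.Set.update s.2.1 (pvP data y '#'),
       PySem.Set.update s.2.2 (pvP data y 'O')) := by
  induction data with
  | nil => intro y s; simp [PySem.List.enumerate_nil, pvP, PySem.Set.update]
  | cons row rest ih =>
    intro y s
    rw [PySem.List.enumerate_cons, List.foldl_cons]
    have hrow : pvStepRow s (y, row) =
        ((pvRowP row.toList 0 y '@').getLast?.or s.1,
         PySem.Set.update s.2.1 (pvRowP row.toList 0 y '#'),
         PySem.Set.update s.2.2 (pvRowP row.toList 0 y 'O')) := row_fold y row.toList 0 s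
    rw [hrow, ih]
    have hP : ∀ ch, pvP (row :: rest) y ch = pvRowP row.toList 0 y ch ++ pvP rest (y + 1) ch := by
      intro ch; simp [pvP, pvRowP, PySem.List.enumerate_cons]
    rw [hP '#', hP 'O', hP '@', getLast?_append_or]
    simp [PySem.Set.update, List.foldl_append, Option.or_assoc]

-- ===== VERDICT (by name: the statement is the Claim_ definition above) =====
theorem parse_world_spec : Claim_equal_parse_world := by
  intro data _
  show parse_world data = parse_world_alt data
  rw [parse_world, grid_fold]
  have h : ∀ ch, pvFindAll data ch = pvP data 0 ch := fun _ => rfl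
  simp [parse_world_alt, h, PySem.Set.update, PySem.Set.ofList_eq_foldl, PySem.Set.empty]
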